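-- pv_equiv track=rewrite | github.com/bibidybopoly/Smart-Keyboard-Layouts | src/populate.py | keyname
-- ===== SOURCE A (Python) =====
-- def keyname(line):
--     """
--     Parses a single line from a .klc file and extracts the lowercase and uppercase
--     character assigned to that key.
--
--     Returns a tuple: (lowercase_char, uppercase_char)
--     """
--     a = ""
--     b = ""
--     cond = 0
--     for char in line:
--         if cond == 2 and char != " " and char != ",":
--             a += char
--         elif cond == 3 and char != " " and char != ",":
--             b += char
--         elif char == "/" or char == ",":
--             cond += 1
--     return (a, b)
-- ===== SOURCE B (Python) =====
-- def keyname(line):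
--     """Two-phase rewrite: first locate the second '/' or ',' delimiter, then
--     extract the two comma-separated fields after it, dropping all spaces."""
--
--     def after_second_delim(s):
--         seen = 0
--         for i, ch in enumerate(s):
--             if ch == "/" or ch == ",":
--                 seen += 1
--                 if seen == 2:
--                     return s[i + 1:]
--         return None
--
--     def field(s):
--         buf = []
--         for i, ch in enumerate(s):
--             if ch == ",":
--                 return "".join(buf), s[i + 1:]
--             if ch != " ":
--                 buf.append(ch)
--         return "".join(buf), ""
--
--     rest = after_second_delim(line)
--     if rest is None:
--         return ("", "")
--     a, rest = field(rest)
--     b, _ = field(rest)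
--     return (a, b)
-- ===== Notes on version B (the rewrite author's own statement) =====
-- stated objective: simpler
-- what changed: Replaced the single four-state fold that interleaves delimiter counting with field building by a two-phase decomposition: locate the suffix after the second '/' or ',' delimiter, then extract each comma-terminated field (spaces dropped) with a small helper.
import Mathlib
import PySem

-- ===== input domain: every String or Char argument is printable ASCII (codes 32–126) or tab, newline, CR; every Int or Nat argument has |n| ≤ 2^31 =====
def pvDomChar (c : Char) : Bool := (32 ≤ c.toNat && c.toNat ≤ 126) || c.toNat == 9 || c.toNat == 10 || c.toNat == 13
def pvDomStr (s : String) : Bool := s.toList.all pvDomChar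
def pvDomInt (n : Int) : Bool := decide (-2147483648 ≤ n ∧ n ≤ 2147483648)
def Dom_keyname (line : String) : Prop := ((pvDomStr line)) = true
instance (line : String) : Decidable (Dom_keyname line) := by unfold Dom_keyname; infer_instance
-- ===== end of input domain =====

-- B replaces A's single four-state character fold by a two-phase decomposition
-- (find the suffix after the second delimiter, then extract two comma-terminated
-- fields); same return value, objective: simpler.


-- ===== PORT A =====
-- one loop iteration of A: the three branches in A's order, over state (a, b, cond)
def keynameStep (st : List Char × List Char × Nat) (c : Char) : List Char × List Char × Nat :=
  if st.2.2 = 2 ∧ c ≠ ' ' ∧ c ≠ ',' then (st.1 ++ [c], st.2.1, st.2.2)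
  else if st.2.2 = 3 ∧ c ≠ ' ' ∧ c ≠ ',' then (st.1, st.2.1 ++ [c], st.2.2)
  else if c = '/' ∨ c = ',' then (st.1, st.2.1, st.2.2 + 1)
  else st

def keyname (line : String) : String × String :=
  let r := line.toList.foldl keynameStep ([], [], 0)
  (String.ofList r.1, String.ofList r.2.1)

-- ===== PORT B =====
-- Source B's after_second_delim: the enumerate loop carried as recursion on the suffix
def afterSecondDelim (s : List Char) (seen : Nat) : Option (List Char) :=
  match s with
  | [] => none
  | c :: t =>
    if c = '/' ∨ c = ',' then
      if seen + 1 = 2 then some t else afterSecondDelim t (seen + 1)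
    else afterSecondDelim t seen

-- Source B's field: collect non-space chars until the first ',', return (field, remainder)
def fieldB (s : List Char) : List Char × List Char :=
  match s with
  | [] => ([], [])
  | c :: t =>
    if c = ',' then ([], t)
    else
      let p := fieldB t
      (if c ≠ ' ' then c :: p.1 else p.1, p.2)

def keyname_alt (line : String) : String × String :=
  match afterSecondDelim line.toList 0 with
  | none => ("", "")
  | some rest =>
    let p := fieldB rest
    let q := fieldB p.2
    (String.ofList p.1, String.ofList q.1)

-- ===== PRECONDITION & SPEC =====
def Spec_keyname (line : String) (out : String × String) : Prop := out = keyname_alt line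
instance (line : String) (out : String × String) : Decidable (Spec_keyname line out) := by unfold Spec_keyname; infer_instance

-- ===== CLAIM (what is proved, stated in full; the proofs are below) =====
def Claim_equal_keyname : Prop := ∀ (line : String), Dom_keyname line → Spec_keyname line (keyname line)

-- ===== LEMMAS AND PROOFS =====

-- once cond ≥ 4, A's loop never changes a or b again
theorem foldl_step_ge4 (cs : List Char) (a b : List Char) (k : Nat) (hk : 4 ≤ k) :
    (cs.foldl keynameStep (a, b, k)).1 = a ∧ (cs.foldl keynameStep (a, b, k)).2.1 = b := by
  induction cs generalizing k with
  | nil => exact ⟨rfl, rfl⟩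
  | cons c t ih =>
    simp only [List.foldl_cons, keynameStep]
    split_ifs with h1 h2 h3
    · omega
    · omega
    · exact ih (k + 1) (by omega)
    · exact ih k hk

-- in state cond = 3 A collects exactly fieldB's field into b
theorem foldl_step_3 (cs : List Char) (a b : List Char) :
    (cs.foldl keynameStep (a, b, 3)).1 = a ∧
    (cs.foldl keynameStep (a, b, 3)).2.1 = b ++ (fieldB cs).1 := by
  induction cs generalizing b with
  | nil => simp [fieldB]
  | cons c t ih =>
    by_cases hcomma : c = ','
    · subst hcomma
      simp only [List.foldl_cons, keynameStep, fieldB]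
      have h4 := foldl_step_ge4 t a b 4 (by omega)
      simp_all
    · by_cases hsp : c = ' '
      · subst hsp
        simp only [List.foldl_cons, keynameStep, fieldB]
        have := ih b
        simp_all
      · simp only [List.foldl_cons, keynameStep, fieldB]
        have := ih (b ++ [c])
        simp_all

-- in state cond = 2 A collects fieldB's two fields into a and b
theorem foldl_step_2 (cs : List Char) (a b : List Char) :
    (cs.foldl keynameStep (a, b, 2)).1 = a ++ (fieldB cs).1 ∧
    (cs.foldl keynameStep (a, b, 2)).2.1 = b ++ (fieldB (fieldB cs).2).1 := by
  induction cs generalizing a with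
  | nil => simp [fieldB]
  | cons c t ih =>
    by_cases hcomma : c = ','
    · subst hcomma
      simp only [List.foldl_cons, keynameStep, fieldB]
      have h3 := foldl_step_3 t a b
      simp_all
    · by_cases hsp : c = ' '
      · subst hsp
        simp only [List.foldl_cons, keynameStep, fieldB]
        have := ih a
        simp_all
      · simp only [List.foldl_cons, keynameStep, fieldB]
        have := ih (a ++ [c])
        simp_all

-- before the second delimiter A only counts; afterSecondDelim names the remaining suffix
theorem foldl_step_lt2 (cs : List Char) (a b : List Char) (k : Nat) (hk : k ≤ 1) :
    (cs.foldl keynameStep (a, b, k)).1 = (match afterSecondDelim cs k with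
      | none => a
      | some t => a ++ (fieldB t).1) ∧
    (cs.foldl keynameStep (a, b, k)).2.1 = (match afterSecondDelim cs k with
      | none => b
      | some t => b ++ (fieldB (fieldB t).2).1) := by
  induction cs generalizing k with
  | nil => exact ⟨rfl, rfl⟩
  | cons c t ih =>
    by_cases hd : c = '/' ∨ c = ','
    · by_cases h2 : k + 1 = 2
      · simp only [List.foldl_cons, keynameStep, afterSecondDelim]
        have := foldl_step_2 t a b
        simp_all
      · simp only [List.foldl_cons, keynameStep, afterSecondDelim]
        have hk2 : ¬ k = 2 := by omega
        have hk3 : ¬ k = 3 := by omega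
        have := ih (k + 1) (by omega)
        simp_all
    · simp only [List.foldl_cons, keynameStep, afterSecondDelim]
      have hk2 : ¬ k = 2 := by omega
      have hk3 : ¬ k = 3 := by omega
      have := ih k hk
      simp_all

-- ===== VERDICT (by name: the statement is the Claim_ definition above) =====
theorem keyname_spec : Claim_equal_keyname := by
  intro line _
  show _ = _
  unfold keyname keyname_alt
  have h := foldl_step_lt2 line.toList [] [] 0 (by omega)
  cases hA : afterSecondDelim line.toList 0 with
  | none => rw [hA] at h; exact Prod.ext (congrArg String.ofList h.1) (congrArg String.ofList h.2)
  | some rest => rw [hA] at h; exact Prod.ext (congrArg String.ofList h.1) (congrArg String.ofList h.2)
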